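-- pv_equiv track=rewrite | github.com/xcodz/decoding-the-book-of-soyga | soyga_version2_research_scripts_and_outputs/soyga_phase6_breakthrough/phase6_code.py | seq_features
-- ===== SOURCE A (Python) =====
-- FIB = [1,1,2,3,5,8]
--
-- def seq_features(seq):
--     diffs = [seq[i+1] - seq[i] for i in range(len(seq)-1)]
--     direction_changes = sum((diffs[i] * diffs[i-1] < 0) for i in range(1, len(diffs)))
--     return {
--         "sum_mod23": sum(seq) % 23,
--         "span": max(seq) - min(seq),
--         "direction_changes": direction_changes,
--         "fib_mod23": sum(a*b for a,b in zip(seq, FIB)) % 23,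
--     }
-- ===== SOURCE B (Python) =====
-- FIB = [1, 1, 2, 3, 5, 8]
--
-- def seq_features(seq):
--     total = 0
--     mn = mx = seq[0]
--     dot = 0
--     changes = 0
--     prev = None
--     prevdiff = None
--     for i, x in enumerate(seq):
--         total += x
--         if x < mn:
--             mn = x
--         if x > mx:
--             mx = x
--         if i < len(FIB):
--             dot += x * FIB[i]
--         if prev is not None:
--             d = x - prev
--             if prevdiff is not None and d * prevdiff < 0:
--                 changes += 1
--             prevdiff = d
--         prev = x
--     return {
--         "sum_mod23": total % 23,
--         "span": mx - mn,
--         "direction_changes": changes,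
--         "fib_mod23": dot % 23,
--     }
-- ===== Notes on version B (the rewrite author's own statement) =====
-- stated objective: alternative
-- what changed: B replaces A's four separate passes (diffs comprehension, index-based indicator sum, sum/max/min builtins, zip dot product) with one fused enumerate loop maintaining running total, min, max, fib dot and previous-diff sign state.
import Mathlib
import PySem

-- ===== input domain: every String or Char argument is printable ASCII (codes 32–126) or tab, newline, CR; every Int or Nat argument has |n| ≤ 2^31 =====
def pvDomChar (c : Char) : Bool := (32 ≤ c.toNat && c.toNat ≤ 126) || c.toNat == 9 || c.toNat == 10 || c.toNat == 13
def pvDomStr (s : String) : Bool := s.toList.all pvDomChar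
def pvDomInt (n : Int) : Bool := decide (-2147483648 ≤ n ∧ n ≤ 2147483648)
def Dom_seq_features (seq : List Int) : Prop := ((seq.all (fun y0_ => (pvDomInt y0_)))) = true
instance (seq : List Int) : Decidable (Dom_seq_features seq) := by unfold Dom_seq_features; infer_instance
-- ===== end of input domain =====

-- B fuses A's four separate passes (diffs comprehension, indicator sum, sum/max/min, zip-dot)
-- into a single enumerate loop maintaining running state; objective: alternative (one traversal).

def FIBL : List Int := [1, 1, 2, 3, 5, 8]

-- ===== PORT A =====
def seq_features (seq : List Int) : List (String × Int) :=
  let diffs := (PySem.List.pyRange 0 ((seq.length : Int) - 1) 1).map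
      (fun i => PySem.List.pyGetD seq (i + 1) 0 - PySem.List.pyGetD seq i 0)
  let direction_changes := ((PySem.List.pyRange 1 ((diffs.length : Int)) 1).map
      (fun i => if PySem.List.pyGetD diffs i 0 * PySem.List.pyGetD diffs (i - 1) 0 < 0
                then (1 : Int) else 0)).sum
  [("sum_mod23", PySem.Int.mod seq.sum 23),
   ("span", (PySem.List.max? seq (fun y => y)).getD 0 - (PySem.List.min? seq (fun y => y)).getD 0),
   ("direction_changes", direction_changes),
   ("fib_mod23", PySem.Int.mod (((seq.zip FIBL).map (fun p => p.1 * p.2)).sum) 23)]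

-- ===== PORT B =====
def altStep (st : Int × Int × Int × Int × Int × Option Int × Option Int) (ix : Int × Int) :
    Int × Int × Int × Int × Int × Option Int × Option Int :=
  match st, ix with
  | (total, mn, mx, dot, changes, prev, prevdiff), (i, x) =>
    let total := total + x
    let mn := if x < mn then x else mn
    let mx := if x > mx then x else mx
    let dot := if i < (FIBL.length : Int) then dot + x * PySem.List.pyGetD FIBL i 0 else dot
    let cp : Int × Option Int :=
      match prev with
      | none => (changes, prevdiff)
      | some p =>
        let d := x - p
        match prevdiff with
        | some pd => (if d * pd < 0 then changes + 1 else changes, some d)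
        | none => (changes, some d)
    (total, mn, mx, dot, cp.1, some x, cp.2)

def seq_features_alt (seq : List Int) : List (String × Int) :=
  let x0 := PySem.List.pyGetD seq 0 0
  let st := (PySem.List.enumerate seq).foldl altStep (0, x0, x0, 0, 0, none, none)
  match st with
  | (total, mn, mx, dot, changes, _, _) =>
    [("sum_mod23", PySem.Int.mod total 23),
     ("span", mx - mn),
     ("direction_changes", changes),
     ("fib_mod23", PySem.Int.mod dot 23)]

-- ===== PRECONDITION & SPEC =====
-- Pre_ excludes only the empty list, on which Python A raises ValueError (max() of empty sequence).
def Pre_seq_features (seq : List Int) : Prop := seq ≠ []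
instance (seq : List Int) : Decidable (Pre_seq_features seq) := by unfold Pre_seq_features; infer_instance
def pvWitness_seq_features : List Int := [3, 1, 4, 1, 5]

def Spec_seq_features (seq : List Int) (out : List (String × Int)) : Prop := out = seq_features_alt seq
instance (seq : List Int) (out : List (String × Int)) : Decidable (Spec_seq_features seq out) := by unfold Spec_seq_features; infer_instance

-- ===== CLAIM (what is proved, stated in full; the proofs are below) =====
def Claim_equal_seq_features : Prop := ∀ (seq : List Int), Dom_seq_features seq → Pre_seq_features seq → Spec_seq_features seq (seq_features seq)

-- ===== LEMMAS AND PROOFS =====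

-- reference recursions used only by the proofs
def diffsOf (p : Int) : List Int → List Int
  | [] => []
  | x :: xs => (x - p) :: diffsOf x xs

def pairC : List Int → Int
  | [] => 0
  | [_] => 0
  | d :: e :: rest => (if e * d < 0 then (1 : Int) else 0) + pairC (e :: rest)

def chC : Option Int → Int → List Int → Int
  | _, _, [] => 0
  | pd, p, x :: xs =>
    (match pd with
     | some q => if (x - p) * q < 0 then (1 : Int) else 0
     | none => 0) + chC (some (x - p)) x xs

def dotF : Int → List Int → Int
  | _, [] => 0
  | k, x :: xs => (if k < (FIBL.length : Int) then x * PySem.List.pyGetD FIBL k 0 else 0) + dotF (k + 1) xs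

lemma if_lt_eq_min (a b : Int) : (if b < a then b else a) = min a b := by
  simp [min_def]; omega

lemma if_gt_eq_max (a b : Int) : (if b > a then b else a) = max a b := by
  simp [max_def]; omega

-- the fold invariant for B's single pass (prev already set)
lemma fold_spec (t : List Int) : ∀ (k : Int) (p total mn mx dot changes : Int) (pd : Option Int),
    ∃ pr pd',
    (PySem.List.enumerate t k).foldl altStep (total, mn, mx, dot, changes, some p, pd)
      = (total + t.sum, t.foldl min mn, t.foldl max mx,
         dot + dotF k t, changes + chC pd p t, pr, pd') := by
  induction t with
  | nil =>
    intro k p total mn mx dot changes pd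
    exact ⟨some p, pd, by simp [PySem.List.enumerate, dotF, chC]⟩
  | cons x xs ih =>
    intro k p total mn mx dot changes pd
    rw [PySem.List.enumerate_cons, List.foldl_cons]
    have hstep : altStep (total, mn, mx, dot, changes, some p, pd) (k, x)
        = (total + x, min mn x, max mx x,
           (if k < (FIBL.length : Int) then dot + x * PySem.List.pyGetD FIBL k 0 else dot),
           changes + (match pd with | some q => if (x - p) * q < 0 then (1:Int) else 0 | none => 0),
           some x, some (x - p)) := by
      cases pd
      · simp [altStep, if_lt_eq_min, if_gt_eq_max]
      · simp [altStep, if_lt_eq_min, if_gt_eq_max]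
        split_ifs <;> ring
    rw [hstep]
    obtain ⟨pr, pd', h⟩ := ih (k+1) x (total + x) (min mn x) (max mx x) _ _ (some (x - p))
    refine ⟨pr, pd', h.trans ?_⟩
    simp [dotF, chC]
    refine ⟨by ring, by split_ifs <;> ring, by ring⟩

lemma length_diffsOf (p : Int) (t : List Int) : (diffsOf p t).length = t.length := by
  induction t generalizing p with
  | nil => rfl
  | cons x xs ih => simp [diffsOf, ih]

lemma getElem_diffsOf (t : List Int) : ∀ (p : Int) (i : Nat) (h : i < t.length),
    (diffsOf p t)[i]'(by rw [length_diffsOf]; exact h)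
      = (p :: t)[i+1]'(by simpa) - (p :: t)[i]'(by simp; omega) := by
  induction t with
  | nil => intro p i h; simp at h
  | cons x xs ih =>
    intro p i h
    cases i with
    | zero => simp [diffsOf]
    | succ j =>
      have hj : j < xs.length := by simpa using h
      simpa [diffsOf] using ih x j hj

lemma pairC_eq_range (ds : List Int) :
    pairC ds = ((List.range (ds.length - 1)).map
      (fun j => if ds.getD (j+1) 0 * ds.getD j 0 < 0 then (1:Int) else 0)).sum := by
  match ds with
  | [] => simp [pairC]
  | [d] => simp [pairC]
  | d :: e :: rest =>
    have ih := pairC_eq_range (e :: rest)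
    simp only [pairC, List.length_cons, Nat.add_sub_cancel, List.range_succ_eq_map,
      List.map_cons, List.map_map, List.sum_cons]
    rw [ih]
    congr 1

lemma pyRange_one_to_range (m : Nat) :
    PySem.List.pyRange 1 ((m:Int)) 1 = (List.range (m-1)).map (fun k : Nat => ((k:Int)+1)) := by
  rw [PySem.List.pyRange_of_pos _ _ (by norm_num)]
  have h : (if (1:Int) < m then (((m:Int) - 1 + 1 - 1) / 1).toNat else 0) = m - 1 := by
    split_ifs with h <;> omega
  rw [h]
  apply List.map_congr_left
  intro k _
  ring

-- A's diffs comprehension is the structural recursion diffsOf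
lemma diffs_eq (p : Int) (t : List Int) :
    (PySem.List.pyRange 0 ((t.length : Int)) 1).map
      (fun i => PySem.List.pyGetD (p :: t) (i + 1) 0 - PySem.List.pyGetD (p :: t) i 0)
      = diffsOf p t := by
  rw [PySem.List.pyRange_zero_natCast, List.map_map]
  apply List.ext_getElem
  · simp [length_diffsOf]
  · intro i h1 h2
    simp only [List.getElem_map, List.getElem_range, Function.comp]
    have hi : i < t.length := by simpa using h1
    rw [show ((i:Int) + 1) = ((i+1 : Nat) : Int) by push_cast; ring,
      PySem.List.pyGetD_natCast, PySem.List.pyGetD_natCast, getElem_diffsOf t p i hi]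
    rw [List.getD_eq_getElem _ _ (by simpa), List.getD_eq_getElem _ _ (by simp; omega)]

-- A's indicator sum over indices of ds is the structural pair count
lemma dir_eq (ds : List Int) :
    ((PySem.List.pyRange 1 ((ds.length : Int)) 1).map
      (fun i => if PySem.List.pyGetD ds i 0 * PySem.List.pyGetD ds (i - 1) 0 < 0
                then (1 : Int) else 0)).sum = pairC ds := by
  rw [pyRange_one_to_range, List.map_map, pairC_eq_range]
  apply congrArg
  apply List.map_congr_left
  intro j _
  simp only [Function.comp]
  have e1 : PySem.List.pyGetD ds ((j:Int)+1) 0 = ds.getD (j+1) 0 := by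
    rw [show ((j:Int) + 1) = ((j+1 : Nat) : Int) by push_cast; ring, PySem.List.pyGetD_natCast]
  have e2 : PySem.List.pyGetD ds ((j:Int)+1-1) 0 = ds.getD j 0 := by
    rw [show ((j:Int) + 1 - 1) = ((j : Nat) : Int) by ring, PySem.List.pyGetD_natCast]
  simp only [e1, e2]

lemma pairC_diffs (t : List Int) : ∀ (p : Int) (q : Int),
    pairC (q :: diffsOf p t) = chC (some q) p t := by
  induction t with
  | nil => intro p q; simp [diffsOf, pairC, chC]
  | cons x xs ih => intro p q; simp [diffsOf, pairC, chC, ih]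

lemma chC_none (p : Int) (t : List Int) : chC none p t = pairC (diffsOf p t) := by
  cases t with
  | nil => simp [diffsOf, pairC, chC]
  | cons x xs => simp [diffsOf, chC, pairC_diffs]

lemma dotF_zip (t : List Int) : ∀ (k : Nat),
    dotF (k : Int) t = ((t.zip (FIBL.drop k)).map (fun p => p.1 * p.2)).sum := by
  induction t with
  | nil => intro k; simp [dotF]
  | cons x xs ih =>
    intro k
    have hk1 : ((k:Int) + 1) = ((k+1 : Nat) : Int) := by push_cast; ring
    by_cases h : k < FIBL.length
    · rw [List.drop_eq_getElem_cons h]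
      simp only [dotF, List.zip_cons_cons, List.map_cons, List.sum_cons]
      rw [hk1, ih (k+1), PySem.List.pyGetD_natCast, List.getD_eq_getElem _ _ h,
        if_pos (by exact_mod_cast h)]
    · have hd : FIBL.drop k = [] := List.drop_of_length_le (by omega)
      have hd1 : FIBL.drop (k+1) = [] := List.drop_of_length_le (by omega)
      simp only [dotF, hd, List.zip_nil_right, List.map_nil, List.sum_nil]
      rw [hk1, ih (k+1), hd1]
      simp
      omega

-- ===== VERDICT (by name: the statement is the Claim_ definition above) =====
theorem seq_features_spec : Claim_equal_seq_features := by
  intro seq _ hpre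
  unfold Spec_seq_features
  match seq with
  | [] => exact absurd rfl hpre
  | h :: t =>
    simp only [seq_features, seq_features_alt]
    rw [PySem.List.enumerate_cons]
    norm_num
    obtain ⟨pr, pd', hf⟩ := fold_spec t 1 h h h h h 0 none
    have hstep1 : altStep (0, h, h, 0, 0, none, none) (0, h) = (h, h, h, h, 0, some h, none) := by
      norm_num [altStep, FIBL, PySem.List.pyGetD, PySem.List.pyIdx?]
    rw [hstep1, hf]
    refine ⟨rfl, ?_, ?_, ?_⟩
    · rw [PySem.List.max?_id_cons, PySem.List.min?_id_cons]
      rfl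
    · rw [diffs_eq h t, show ((t.length : Int)) = (((diffsOf h t).length : Int)) by
        rw [length_diffsOf], dir_eq (diffsOf h t), ← chC_none]
      simp
    · have h1 : dotF ((1:Nat) : Int) t = ((t.zip (FIBL.drop 1)).map (fun p => p.1 * p.2)).sum :=
        dotF_zip t 1
      simp only [Nat.cast_one] at h1
      simp only [FIBL, List.drop_succ_cons, List.drop_zero] at h1
      simp [FIBL, h1]
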